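-- pv_equiv track=rewrite | github.com/david-saint/machine-dialogues | src/research_harness/transcript.py | rebuild_histories
-- ===== SOURCE A (Python) =====
-- def rebuild_histories(entries: list[dict]) -> tuple[list[dict], list[dict], str, int]:
--     """Rebuild history_a, history_b, current_message, and last_turn from parsed entries."""
--     history_a: list[dict] = []
--     history_b: list[dict] = []
--
--     if not entries:
--         return history_a, history_b, "", 0
--
--     current_message = entries[0]["content"]
--     last_turn = 0
--
--     i = 1
--     while i < len(entries):
--         # Agent A entry
--         content_a = entries[i]["content"]
--         history_a.append({"role": "user", "content": current_message})
--         history_a.append({"role": "assistant", "content": content_a})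
--         i += 1
--
--         if i < len(entries):
--             # Agent B entry
--             content_b = entries[i]["content"]
--             history_b.append({"role": "user", "content": content_a})
--             history_b.append({"role": "assistant", "content": content_b})
--             current_message = content_b
--             i += 1
--         else:
--             # Incomplete turn — only A responded
--             current_message = content_a
--
--         last_turn += 1
--
--     return history_a, history_b, current_message, last_turn
-- ===== SOURCE B (Python) =====
-- def rebuild_histories(entries: list[dict]) -> tuple[list[dict], list[dict], str, int]:
--     """Rebuild history_a, history_b, current_message, and last_turn from parsed entries."""
--     if not entries:
--         return [], [], "", 0
--     return (_pair_rows(entries), _pair_rows(entries[1:]),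
--             entries[-1]["content"], len(entries) // 2)
--
--
-- def _pair_rows(xs: list[dict]) -> list[dict]:
--     """user/assistant rows for successive disjoint (prompt, reply) pairs of xs."""
--     rows = []
--     it = iter(xs)
--     for u, a in zip(it, it):  # chunk xs two at a time; a trailing odd element is dropped
--         rows.append({"role": "user", "content": u["content"]})
--         rows.append({"role": "assistant", "content": a["content"]})
--     return rows
-- ===== Notes on version B (the rewrite author's own statement) =====
-- stated objective: simpler
-- what changed: Replaces A's single stateful while-loop (index i, running current_message and last_turn accumulators, interleaved appends to both histories) with two independent pair-chunking passes (_pair_rows over entries and over entries[1:]) plus the closed forms entries[-1]['content'] and len(entries)//2.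
import Mathlib
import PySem

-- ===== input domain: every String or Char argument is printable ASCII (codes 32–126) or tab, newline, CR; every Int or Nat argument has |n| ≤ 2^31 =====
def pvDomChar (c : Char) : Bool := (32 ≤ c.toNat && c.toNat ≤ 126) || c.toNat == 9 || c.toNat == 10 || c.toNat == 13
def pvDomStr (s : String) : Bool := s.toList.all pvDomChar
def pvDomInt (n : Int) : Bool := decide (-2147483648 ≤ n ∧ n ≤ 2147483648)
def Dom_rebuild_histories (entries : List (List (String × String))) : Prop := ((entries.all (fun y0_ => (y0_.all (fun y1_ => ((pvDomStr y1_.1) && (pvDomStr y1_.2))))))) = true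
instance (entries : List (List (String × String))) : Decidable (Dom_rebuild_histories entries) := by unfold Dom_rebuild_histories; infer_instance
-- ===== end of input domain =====

-- B replaces A's single stateful interleaved while-loop with two independent
-- pair-chunking passes plus closed-form current_message / last_turn (objective: simpler).

-- shared helper: e["content"] for a dict given as an association list (first match);
-- a missing key is a Python KeyError, excluded by Pre_, so the default "" is never used there
def pvContent (e : List (String × String)) : String := (e.lookup "content").getD ""

-- ===== PORT A =====
-- the while-loop of A: state (history_a, history_b, current_message, last_turn), two entries per iteration
def rhLoop (rest : List (List (String × String))) (ha hb : List (List (String × String)))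
    (cur : String) (lt : Int) :
    (List (List (String × String))) × (List (List (String × String))) × String × Int :=
  match rest with
  | [] => (ha, hb, cur, lt)
  | [ea] =>
      -- incomplete turn: only agent A responded
      let ca := pvContent ea
      (ha ++ [[("role", "user"), ("content", cur)], [("role", "assistant"), ("content", ca)]],
       hb, ca, lt + 1)
  | ea :: eb :: rest' =>
      let ca := pvContent ea
      let cb := pvContent eb
      rhLoop rest'
        (ha ++ [[("role", "user"), ("content", cur)], [("role", "assistant"), ("content", ca)]])
        (hb ++ [[("role", "user"), ("content", ca)], [("role", "assistant"), ("content", cb)]])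
        cb (lt + 1)

def rebuild_histories (entries : List (List (String × String))) : (List (List (String × String))) × (List (List (String × String))) × String × Int :=
  match entries with
  | [] => ([], [], "", 0)
  | e0 :: rest => rhLoop rest [] [] (pvContent e0) 0

-- ===== PORT B =====
-- _pair_rows of Source B: 'for u, a in zip(it, it)' consumes xs two at a time (a trailing
-- odd element is dropped) — ported exactly as two-at-a-time structural recursion
def rhPairs (xs : List (List (String × String))) : List (List (String × String)) :=
  match xs with
  | eu :: ea :: rest =>
      [("role", "user"), ("content", pvContent eu)]
        :: [("role", "assistant"), ("content", pvContent ea)]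
        :: rhPairs rest
  | _ => []

def rebuild_histories_alt (entries : List (List (String × String))) : (List (List (String × String))) × (List (List (String × String))) × String × Int :=
  match entries with
  | [] => ([], [], "", 0)
  | _ :: _ =>
      (rhPairs entries,
       rhPairs (PySem.List.slice entries (some 1) none),          -- entries[1:]
       pvContent (PySem.List.pyGetD entries (-1) []),             -- entries[-1]["content"]; in range: entries ≠ []
       PySem.Int.floordiv ((entries.length : Int)) 2)             -- len(entries) // 2

-- ===== PRECONDITION & SPEC =====
-- Pre_ excludes exactly the inputs where A raises KeyError: an entry without a "content" key
def Pre_rebuild_histories (entries : List (List (String × String))) : Prop :=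
  (entries.all (fun e => (e.lookup "content").isSome)) = true
instance (entries : List (List (String × String))) : Decidable (Pre_rebuild_histories entries) := by unfold Pre_rebuild_histories; infer_instance

def pvWitness_rebuild_histories : (List (List (String × String))) :=
  [[("content", "hello")], [("content", "hi there")], [("content", "ok")]]

def Spec_rebuild_histories (entries : List (List (String × String))) (out : (List (List (String × String))) × (List (List (String × String))) × String × Int) : Prop := out = rebuild_histories_alt entries
instance (entries : List (List (String × String))) (out : (List (List (String × String))) × (List (List (String × String))) × String × Int) : Decidable (Spec_rebuild_histories entries out) := by unfold Spec_rebuild_histories; infer_instance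

-- ===== CLAIM (what is proved, stated in full; the proofs are below) =====
def Claim_equal_rebuild_histories : Prop := ∀ (entries : List (List (String × String))), Dom_rebuild_histories entries → Pre_rebuild_histories entries → Spec_rebuild_histories entries (rebuild_histories entries)

-- ===== LEMMAS AND PROOFS =====

-- two-at-a-time induction on lists
theorem pvTwoStep {α : Type} {P : List α → Prop} (h0 : P []) (h1 : ∀ a, P [a])
    (h2 : ∀ a b r, P r → P (a :: b :: r)) : ∀ l : List α, P l
  | [] => h0
  | [a] => h1 a
  | a :: b :: r => h2 a b r (pvTwoStep h0 h1 h2 r)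

-- the loop of A computed in B's terms
theorem rhLoop_eq : ∀ (rest : List (List (String × String))) (e0 : List (String × String))
    (ha hb : List (List (String × String))) (lt : Int),
    rhLoop rest ha hb (pvContent e0) lt =
      (ha ++ rhPairs (e0 :: rest), hb ++ rhPairs rest,
       pvContent (((e0 :: rest).getLast?).getD []),
       lt + (((rest.length + 1) / 2 : Nat) : Int)) := by
  intro rest
  induction rest using pvTwoStep with
  | h0 => intro e0 ha hb lt; simp [rhLoop, rhPairs]
  | h1 a => intro e0 ha hb lt; simp [rhLoop, rhPairs]
  | h2 a b r ih =>
      intro e0 ha hb lt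
      show rhLoop r _ _ (pvContent b) _ = _
      rw [ih b]
      simp only [rhPairs, List.getLast?_cons_cons, List.length_cons, Prod.mk.injEq]
      refine ⟨by simp, by simp, by simp, by omega⟩

-- ===== VERDICT (by name: the statement is the Claim_ definition above) =====
theorem rebuild_histories_spec : Claim_equal_rebuild_histories := by
  intro entries _ _
  unfold Spec_rebuild_histories
  match entries with
  | [] => rfl
  | e0 :: rest =>
      show rhLoop rest [] [] (pvContent e0) 0 = _
      rw [rhLoop_eq]
      simp only [rebuild_histories_alt, Prod.mk.injEq]
      refine ⟨by simp, ?_, ?_, ?_⟩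
      · rw [PySem.List.slice_from _ (by norm_num : (0:Int) ≤ 1)]
        simp
      · rw [PySem.List.pyGetD_neg_one _ _ (by simp),
            List.getLast?_eq_some_getLast (show (e0 :: rest) ≠ [] by simp)]
        rfl
      · rw [PySem.Int.floordiv_eq_ediv_of_pos (by norm_num)]
        simp only [List.length_cons]
        omega
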